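-- pv_equiv track=rewrite | github.com/gfreundt/pythonCode | Codewars/pagesinabook.py | amount_of_pages
-- ===== SOURCE A (Python) =====
-- def amount_of_pages(summary):
--     n = 1
--     pages = 0
--     while True:
--         pages += len(str(n))
--         if pages >= summary:
--             return n
--         n += 1
-- ===== SOURCE B (Python) =====
-- def amount_of_pages(summary):
--     # Walk digit-length blocks instead of single pages: the 9*start numbers
--     # of length d contribute 9*start*d digits; finish inside the final block
--     # with one ceiling division.
--     d = 1
--     start = 1   # first page number with d digits
--     pages = 0   # digits used by pages 1 .. start-1
--     while pages + 9 * start * d < summary: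
--         pages += 9 * start * d
--         start *= 10
--         d += 1
--     if summary <= pages:
--         return start
--     return start + -(-(summary - pages) // d) - 1
-- ===== Notes on version B (the rewrite author's own statement) =====
-- stated objective: faster
-- what changed: Replaces the page-by-page while loop (one len(str(n)) per page) by a walk over digit-length blocks (9*start pages of d digits contribute 9*start*d at once) finished with a single ceiling division inside the final block.
import Mathlib
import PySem

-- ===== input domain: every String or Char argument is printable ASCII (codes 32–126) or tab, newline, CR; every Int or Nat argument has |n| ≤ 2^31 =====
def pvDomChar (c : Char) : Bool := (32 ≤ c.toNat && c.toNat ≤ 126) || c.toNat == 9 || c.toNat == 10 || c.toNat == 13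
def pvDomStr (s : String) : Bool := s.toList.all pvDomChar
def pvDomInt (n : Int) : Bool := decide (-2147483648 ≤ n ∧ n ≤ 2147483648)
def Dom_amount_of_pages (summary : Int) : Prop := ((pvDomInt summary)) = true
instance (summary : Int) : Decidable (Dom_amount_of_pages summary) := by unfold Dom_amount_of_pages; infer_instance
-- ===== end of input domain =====

-- B walks whole digit-length blocks (9·start pages of d digits at a time) and finishes
-- with one ceiling division, instead of A's page-by-page count; objective: faster.

-- len(str(n)) ≥ 1 — needed by port A's while-loop for termination
lemma pvToDigitsCore_len : ∀ (f n : Nat), n < f →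
    (Nat.toDigitsCore 10 f n []).length = Nat.log 10 n + 1 := by
  intro f
  induction f with
  | zero => intro n h; omega
  | succ f ih =>
    intro n h
    rw [Nat.toDigitsCore]
    by_cases h10 : n / 10 = 0
    · have hn10 : n < 10 := by omega
      simp [h10, Nat.log_eq_zero_iff, hn10]
    · have hge : 10 ≤ n := by omega
      simp only [h10, if_false]
      rw [Nat.toDigitsCore_lens_eq, ih (n / 10) (by
        have := Nat.div_lt_self (by omega : 0 < n) (by omega : 1 < 10); omega)]
      have hpos := Nat.log_pos (b := 10) (n := n) (by omega) hge
      rw [Nat.log_div_base]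
      omega

lemma pvLenToChars_pos (n : Int) : 1 ≤ (PySem.Int.toChars n).length := by
  unfold PySem.Int.toChars
  split
  · simp
  · rw [Nat.toDigits, pvToDigitsCore_len _ _ (Nat.lt_succ_self _)]
    omega

lemma pvLenA (n : Int) :
    PySem.Str.len (PySem.Int.toStr n) = ((PySem.Int.toChars n).length : Int) := by
  rw [PySem.Str.len_eq, PySem.Int.toList_toStr]

-- ===== PORT A =====
def amountLoopA (summary n pages : Int) : Int :=
  -- while True: pages += len(str(n)); if pages >= summary: return n; n += 1
  let pages' := pages + PySem.Str.len (PySem.Int.toStr n)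
  if pages' ≥ summary then n
  else amountLoopA summary (n + 1) pages'
termination_by (summary - pages).toNat
decreasing_by
  have h1 := pvLenToChars_pos n
  have h2 := pvLenA n
  omega

def amount_of_pages (summary : Int) : Int := amountLoopA summary 1 0

-- ===== PORT B =====
def amountLoopB (summary d start pages : Int) (hd : 1 ≤ d) (hs : 1 ≤ start) : Int :=
  -- while pages + 9*start*d < summary: pages += 9*start*d; start *= 10; d += 1
  if pages + 9 * start * d < summary then
    amountLoopB summary (d + 1) (start * 10) (pages + 9 * start * d) (by omega) (by omega)
  else if summary ≤ pages then start
  else start + -(PySem.Int.floordiv (-(summary - pages)) d) - 1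
termination_by (summary - pages).toNat
decreasing_by
  have h9 : 1 ≤ 9 * start * d := by nlinarith
  omega

def amount_of_pages_alt (summary : Int) : Int :=
  amountLoopB summary 1 1 0 (by omega) (by omega)

-- ===== PRECONDITION & SPEC =====
def Spec_amount_of_pages (summary : Int) (out : Int) : Prop := out = amount_of_pages_alt summary
instance (summary : Int) (out : Int) : Decidable (Spec_amount_of_pages summary out) := by unfold Spec_amount_of_pages; infer_instance

-- ===== CLAIM (what is proved, stated in full; the proofs are below) =====
def Claim_equal_amount_of_pages : Prop := ∀ (summary : Int), Dom_amount_of_pages summary → Spec_amount_of_pages summary (amount_of_pages summary)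

-- ===== LEMMAS AND PROOFS =====

-- every integer in [10^e, 10^(e+1)) prints with e+1 characters
lemma pvLenBlock (e : Nat) (j : Int) (h1 : (10:Int) ^ e ≤ j) (h2 : j < (10:Int) ^ (e + 1)) :
    ((PySem.Int.toChars j).length : Int) = (e : Int) + 1 := by
  have hj : 0 < j := lt_of_lt_of_le (by positivity) h1
  have hjn : (j.toNat : Int) = j := Int.toNat_of_nonneg (by omega)
  have hl : (10:Nat) ^ e ≤ j.toNat := by
    have : ((10 ^ e : Nat) : Int) ≤ (j.toNat : Int) := by push_cast; omega
    exact_mod_cast this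
  have hr : j.toNat < (10:Nat) ^ (e + 1) := by
    have : (j.toNat : Int) < ((10 ^ (e + 1) : Nat) : Int) := by push_cast; omega
    exact_mod_cast this
  unfold PySem.Int.toChars
  rw [if_neg (by omega)]
  rw [Nat.toDigits, pvToDigitsCore_len _ _ (Nat.lt_succ_self _)]
  rw [Nat.log_eq_of_pow_le_of_lt_pow hl hr]
  push_cast; ring

lemma pvFloordiv_eq_ediv (a d : Int) (hd : 0 ≤ d) :
    PySem.Int.floordiv a d = a / d := by
  unfold PySem.Int.floordiv
  rw [Int.fdiv_eq_ediv]
  simp [hd]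

-- ceil((r)/d) = 1 when 0 < r ≤ d
lemma pvCeil_one (r d : Int) (hd : 1 ≤ d) (h1 : 0 < r) (h2 : r ≤ d) :
    -(PySem.Int.floordiv (-r) d) = 1 := by
  rw [pvFloordiv_eq_ediv _ _ (by omega)]
  have e1 : (-r + 1 * d) / d = -r / d + 1 := Int.add_mul_ediv_right _ _ (by omega)
  have e2 : (-r + d) / d = 0 := Int.ediv_eq_zero_of_lt (by omega) (by omega)
  have : (-r + 1 * d) = -r + d := by ring
  rw [this] at e1
  omega

-- ceil(r/d) = ceil((r-d)/d) + 1
lemma pvCeil_step (r d : Int) (hd : 1 ≤ d) :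
    -(PySem.Int.floordiv (-r) d) = -(PySem.Int.floordiv (-(r - d)) d) + 1 := by
  rw [pvFloordiv_eq_ediv _ _ (by omega), pvFloordiv_eq_ediv _ _ (by omega)]
  have e1 : (-r + 1 * d) / d = -r / d + 1 := Int.add_mul_ediv_right _ _ (by omega)
  have : (-(r - d)) = -r + 1 * d := by ring
  rw [this]
  omega

lemma pvA_stop (summary n pages : Int)
    (h : summary ≤ pages + ((PySem.Int.toChars n).length : Int)) :
    amountLoopA summary n pages = n := by
  rw [amountLoopA.eq_def, pvLenA]
  simp only [ge_iff_le]
  rw [if_pos h]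

lemma pvA_step (summary n pages : Int)
    (h : pages + ((PySem.Int.toChars n).length : Int) < summary) :
    amountLoopA summary n pages
      = amountLoopA summary (n + 1) (pages + ((PySem.Int.toChars n).length : Int)) := by
  rw [amountLoopA.eq_def, pvLenA]
  simp only [ge_iff_le]
  rw [if_neg (by omega)]

-- skip a run of k pages that all print with d digits
lemma pvA_skip : ∀ (k : Nat) (n pages summary d : Int), 1 ≤ d →
    (∀ j : Int, n ≤ j → j < n + k → ((PySem.Int.toChars j).length : Int) = d) →
    pages + d * k < summary →
    amountLoopA summary n pages = amountLoopA summary (n + k) (pages + d * k) := by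
  intro k
  induction k with
  | zero => intro n pages summary d _ _ _; simp
  | succ k ih =>
    intro n pages summary d hd hlen hlt
    have hk0 : (0:Int) ≤ d * k := by positivity
    have hexp : d * ((k : Int) + 1) = d * k + d := by ring
    have hcast : ((k + 1 : Nat) : Int) = (k : Int) + 1 := by push_cast; ring
    rw [hcast, hexp] at hlt
    have hn : ((PySem.Int.toChars n).length : Int) = d :=
      hlen n le_rfl (by rw [hcast]; omega)
    rw [pvA_step _ _ _ (by omega)]
    rw [hn]
    rw [ih (n + 1) (pages + d) summary d hd
      (fun j hj1 hj2 => hlen j (by omega) (by rw [hcast]; omega)) (by omega)]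
    congr 1 <;> [skip; skip]
    · rw [hcast]; ring
    · rw [hcast]; ring

-- finish inside a run of k pages that all print with d digits
lemma pvA_finish : ∀ (k : Nat) (n pages summary d : Int), 1 ≤ d →
    (∀ j : Int, n ≤ j → j < n + k → ((PySem.Int.toChars j).length : Int) = d) →
    pages < summary → summary ≤ pages + d * k →
    amountLoopA summary n pages
      = n + -(PySem.Int.floordiv (-(summary - pages)) d) - 1 := by
  intro k
  induction k with
  | zero => intro n pages summary d _ _ h1 h2; simp at h2; omega
  | succ k ih =>
    intro n pages summary d hd hlen hlt hle
    have hk0 : (0:Int) ≤ d * k := by positivity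
    have hexp : d * ((k : Int) + 1) = d * k + d := by ring
    have hcast : ((k + 1 : Nat) : Int) = (k : Int) + 1 := by push_cast; ring
    rw [hcast, hexp] at hle
    have hn : ((PySem.Int.toChars n).length : Int) = d :=
      hlen n le_rfl (by rw [hcast]; omega)
    by_cases hr : summary - pages ≤ d
    · rw [pvA_stop _ _ _ (by omega)]
      rw [pvCeil_one _ _ hd (by omega) hr]
      ring
    · rw [pvA_step _ _ _ (by omega), hn]
      rw [ih (n + 1) (pages + d) summary d hd
        (fun j hj1 hj2 => hlen j (by omega) (by rw [hcast]; omega)) (by omega) (by omega)]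
      rw [pvCeil_step (summary - pages) d hd]
      have : -(summary - pages - d) = -(summary - (pages + d)) := by ring
      rw [this]
      ring

lemma pvLoops_eq : ∀ (N : Nat) (summary d start pages : Int)
    (hd : 1 ≤ d) (hs : 1 ≤ start) (e : Nat),
    d = (e : Int) + 1 → start = (10:Int) ^ e → (summary - pages).toNat ≤ N →
    amountLoopA summary start pages = amountLoopB summary d start pages hd hs := by
  intro N
  induction N with
  | zero =>
    intro summary d start pages hd hs e hde hse hN
    -- summary ≤ pages: both sides stop immediately
    rw [amountLoopB.eq_def]
    have h9 : 1 ≤ 9 * start * d := by nlinarith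
    rw [if_neg (by omega), if_pos (by omega)]
    exact pvA_stop _ _ _ (by have := pvLenToChars_pos start; omega)
  | succ N ih =>
    intro summary d start pages hd hs e hde hse hN
    have h9 : 1 ≤ 9 * start * d := by nlinarith
    have hk : (((9 * start).toNat : Int)) = 9 * start := Int.toNat_of_nonneg (by omega)
    have hblock : ∀ j : Int, start ≤ j → j < start + ((9 * start).toNat : Int) →
        ((PySem.Int.toChars j).length : Int) = d := by
      intro j hj1 hj2
      rw [hk] at hj2
      rw [hde]
      exact pvLenBlock e j (hse ▸ hj1) (by rw [pow_succ]; omega)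
    rw [amountLoopB.eq_def]
    by_cases hc : pages + 9 * start * d < summary
    · rw [if_pos hc]
      have hd9 : d * ((9 * start).toNat : Int) = 9 * start * d := by rw [hk]; ring
      rw [pvA_skip ((9 * start).toNat) start pages summary d hd hblock (by omega)]
      rw [hd9, hk]
      have h10 : start + 9 * start = start * 10 := by ring
      rw [h10]
      exact ih summary (d + 1) (start * 10) (pages + 9 * start * d) (by omega) (by omega)
        (e + 1) (by push_cast; omega) (by rw [pow_succ]; omega) (by omega)
    · rw [if_neg hc]
      by_cases hp : summary ≤ pages
      · rw [if_pos hp]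
        exact pvA_stop _ _ _ (by have := pvLenToChars_pos start; omega)
      · rw [if_neg hp]
        have hd9 : d * ((9 * start).toNat : Int) = 9 * start * d := by rw [hk]; ring
        exact pvA_finish ((9 * start).toNat) start pages summary d hd hblock
          (by omega) (by omega)

-- ===== VERDICT (by name: the statement is the Claim_ definition above) =====
theorem amount_of_pages_spec : Claim_equal_amount_of_pages := by
  intro summary _
  unfold Spec_amount_of_pages amount_of_pages amount_of_pages_alt
  exact pvLoops_eq (summary - 0).toNat summary 1 1 0 (by omega) (by omega) 0
    (by norm_num) (by norm_num) le_rfl
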